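-- pv_equiv track=rewrite | github.com/nakulvr/PDP-Parser | PDP_parser.py | function_parse
-- ===== SOURCE A (Python) =====
-- def function_parse(func_comments, items_boolean):
--
--     for comm in func_comments:
--         if comm.find('GIVEN') > 0 and not items_boolean[0]:
--             items_boolean[0] = True
--         if comm.find('RETURNS') > 0 and not items_boolean [1]:
--             items_boolean[1] = True
--         if comm.find('EXAMPLE') > 0 and not items_boolean[2]:
--             items_boolean[2] = True
--         if comm.find('STRATEGY') > 0 and not items_boolean[3]:
--             items_boolean[3] = True
--     return items_boolean
-- ===== SOURCE B (Python) =====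
-- def function_parse(func_comments, items_boolean):
--     for i, kw in enumerate(['GIVEN', 'RETURNS', 'EXAMPLE', 'STRATEGY']):
--         if any(comm.find(kw) > 0 for comm in func_comments):
--             items_boolean[i] = True
--     return items_boolean
-- ===== Notes on version B (the rewrite author's own statement) =====
-- stated objective: simpler
-- what changed: Transposed the iteration: loop over the four keywords and set each flag once via an any() short-circuit over the comments, instead of looping over comments with four guard-and-assign branches each.
import Mathlib
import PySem

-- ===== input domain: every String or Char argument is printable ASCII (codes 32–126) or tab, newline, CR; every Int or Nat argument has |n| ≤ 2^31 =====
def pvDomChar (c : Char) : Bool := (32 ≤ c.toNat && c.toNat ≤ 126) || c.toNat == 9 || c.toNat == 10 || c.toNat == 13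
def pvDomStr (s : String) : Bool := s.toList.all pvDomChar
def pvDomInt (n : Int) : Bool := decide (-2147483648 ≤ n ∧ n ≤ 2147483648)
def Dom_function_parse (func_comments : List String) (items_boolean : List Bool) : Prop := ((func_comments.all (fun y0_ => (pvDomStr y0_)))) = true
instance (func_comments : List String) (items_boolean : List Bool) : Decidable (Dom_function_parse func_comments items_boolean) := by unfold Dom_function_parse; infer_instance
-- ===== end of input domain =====

-- B transposes A's loops (keyword-outer, any() over comments) for a plainer read; A mutates
-- items_boolean in place (B does the same in Python) — the theorems here are about the return value.

-- ===== PORT A =====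
-- one Python statement 'if comm.find(kw) > 0 and not st[i]: st[i] = True'
-- (guard read with getD; Pre_ excludes the inputs where Python's st[i] would raise IndexError)
def updA (i : Nat) (g : Bool) (st : List Bool) : List Bool :=
  if g && !(st.getD i false) then st.set i true else st

-- the body of A's 'for comm in func_comments' loop: the four if-statements in order
def stepA (st : List Bool) (comm : String) : List Bool :=
  updA 3 (decide (PySem.Str.find comm "STRATEGY" > 0))
    (updA 2 (decide (PySem.Str.find comm "EXAMPLE" > 0))
      (updA 1 (decide (PySem.Str.find comm "RETURNS" > 0))
        (updA 0 (decide (PySem.Str.find comm "GIVEN" > 0)) st)))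

def function_parse (func_comments : List String) (items_boolean : List Bool) : List Bool :=
  func_comments.foldl stepA items_boolean

-- ===== PORT B =====
-- 'for i, kw in enumerate([...]): if any(comm.find(kw) > 0 for comm in func_comments): items_boolean[i] = True'
def function_parse_alt (func_comments : List String) (items_boolean : List Bool) : List Bool :=
  [((0 : Nat), "GIVEN"), (1, "RETURNS"), (2, "EXAMPLE"), (3, "STRATEGY")].foldl
    (fun st p =>
      if func_comments.any (fun comm => decide (PySem.Str.find comm p.2 > 0)) then st.set p.1 true
      else st)
    items_boolean

-- ===== PRECONDITION & SPEC =====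
-- Pre_ excludes exactly the inputs where Python A raises IndexError: some comment matching the
-- i-th keyword while items_boolean has no index i (Python B raises there too).
def Pre_function_parse (func_comments : List String) (items_boolean : List Bool) : Prop :=
  (func_comments.any (fun c => decide (PySem.Str.find c "GIVEN" > 0)) = true → 0 < items_boolean.length) ∧
  (func_comments.any (fun c => decide (PySem.Str.find c "RETURNS" > 0)) = true → 1 < items_boolean.length) ∧
  (func_comments.any (fun c => decide (PySem.Str.find c "EXAMPLE" > 0)) = true → 2 < items_boolean.length) ∧
  (func_comments.any (fun c => decide (PySem.Str.find c "STRATEGY" > 0)) = true → 3 < items_boolean.length)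

instance (func_comments : List String) (items_boolean : List Bool) : Decidable (Pre_function_parse func_comments items_boolean) := by
  unfold Pre_function_parse; infer_instance

def pvWitness_function_parse : List String × List Bool :=
  ([" GIVEN x", "no keyword"], [false, false, false, true])

def Spec_function_parse (func_comments : List String) (items_boolean : List Bool) (out : List Bool) : Prop := out = function_parse_alt func_comments items_boolean
instance (func_comments : List String) (items_boolean : List Bool) (out : List Bool) : Decidable (Spec_function_parse func_comments items_boolean out) := by unfold Spec_function_parse; infer_instance

-- ===== CLAIM (what is proved, stated in full; the proofs are below) =====
def Claim_equal_function_parse : Prop := ∀ (func_comments : List String) (items_boolean : List Bool), Dom_function_parse func_comments items_boolean → Pre_function_parse func_comments items_boolean → Spec_function_parse func_comments items_boolean (function_parse func_comments items_boolean)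

-- ===== LEMMAS AND PROOFS =====

-- 'keyword j matched in comment c'
def hit (c : String) (j : Nat) : Bool :=
  (j == 0 && decide (PySem.Str.find c "GIVEN" > 0)) ||
  (j == 1 && decide (PySem.Str.find c "RETURNS" > 0)) ||
  (j == 2 && decide (PySem.Str.find c "EXAMPLE" > 0)) ||
  (j == 3 && decide (PySem.Str.find c "STRATEGY" > 0))

def hits (fc : List String) (j : Nat) : Bool := fc.any (fun c => hit c j)

theorem condSet_getElem? (b : Bool) (i j : Nat) (st : List Bool) :
    (if b then st.set i true else st)[j]? = if j = i then st[j]?.map (fun v => v || b) else st[j]? := by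
  by_cases hj : j = i
  · subst hj
    cases b with
    | false => simp
    | true =>
      rcases h : st[j]? with _ | v
      · have hle : st.length ≤ j := by simpa using List.getElem?_eq_none_iff.mp h
        simp [List.set_eq_of_length_le hle, h]
      · have hlt : j < st.length := (List.getElem?_eq_some_iff.mp h).1
        simp [List.getElem?_set_self hlt]
  · split <;> simp [List.getElem?_set_ne (fun hij => hj hij.symm)]

theorem updA_getElem? (i j : Nat) (g : Bool) (st : List Bool) :
    (updA i g st)[j]? = if j = i then st[j]?.map (fun v => v || g) else st[j]? := by
  unfold updA
  by_cases hj : j = i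
  · subst hj
    cases g with
    | false => simp
    | true =>
      simp only [Bool.true_and, List.getD_eq_getElem?_getD]
      rcases h : st[j]? with _ | v
      · have hle : st.length ≤ j := by simpa using List.getElem?_eq_none_iff.mp h
        simp [h, List.set_eq_of_length_le hle]
      · have hlt : j < st.length := (List.getElem?_eq_some_iff.mp h).1
        cases v <;> simp [h, List.getElem?_set_self hlt]
  · split <;> simp [List.getElem?_set_ne (fun hij => hj hij.symm)]

theorem hit_eq_false (c : String) (j : Nat) (h0 : j ≠ 0) (h1 : j ≠ 1) (h2 : j ≠ 2) (h3 : j ≠ 3) :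
    hit c j = false := by
  simp [hit, h0, h1, h2, h3]

theorem stepA_getElem? (st : List Bool) (c : String) (j : Nat) :
    (stepA st c)[j]? = st[j]?.map (fun v => v || hit c j) := by
  unfold stepA
  simp only [updA_getElem?]
  by_cases h4 : j < 4
  · interval_cases j <;> simp [hit]
  · rw [if_neg (show ¬ j = 3 by omega), if_neg (show ¬ j = 2 by omega),
        if_neg (show ¬ j = 1 by omega), if_neg (show ¬ j = 0 by omega),
        hit_eq_false c j (by omega) (by omega) (by omega) (by omega)]
    simp

theorem foldlA_getElem? (fc : List String) (ib : List Bool) (j : Nat) :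
    (List.foldl stepA ib fc)[j]? = ib[j]?.map (fun v => v || hits fc j) := by
  induction fc generalizing ib with
  | nil => simp [hits]
  | cons c fc ih =>
      simp only [List.foldl_cons, ih, stepA_getElem?, hits, List.any_cons]
      cases ib[j]? <;> simp [Bool.or_assoc]

theorem alt_getElem? (fc : List String) (ib : List Bool) (j : Nat) :
    (function_parse_alt fc ib)[j]? = ib[j]?.map (fun v => v || hits fc j) := by
  unfold function_parse_alt
  simp only [List.foldl_cons, List.foldl_nil, condSet_getElem?]
  by_cases h4 : j < 4
  · interval_cases j <;> simp only [hits] <;> simp [hit]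
  · have hf : hits fc j = false := by
      simp only [hits, List.any_eq_false]
      intro c _
      simp [hit_eq_false c j (by omega) (by omega) (by omega) (by omega)]
    rw [if_neg (show ¬ j = 3 by omega), if_neg (show ¬ j = 2 by omega),
        if_neg (show ¬ j = 1 by omega), if_neg (show ¬ j = 0 by omega), hf]
    simp

-- ===== VERDICT (by name: the statement is the Claim_ definition above) =====
theorem function_parse_spec : Claim_equal_function_parse := by
  intro fc ib _ _
  unfold Spec_function_parse function_parse
  apply List.ext_getElem?
  intro j
  rw [foldlA_getElem?, alt_getElem?]
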